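-- pv_equiv track=rewrite | github.com/jurekjurek/internship_BlockAggregation | block_aggregation.py | EvaluateGateCoverage
-- ===== SOURCE A (Python) =====
-- def EvaluateGateCoverage(S, G, nQ, qMax, mMax):
--     '''
--     evaluates gate coverage given:
--         1. S: A set of qubit sets S
--         2. G: A gate Coverage set G
--         3. nQ: The total number of qubits
--         4. qMax: The maximal number of qubits in a processing zone qMax
--         5. mMax: The maximal number of processing zones mMax
--
--     returns two ints gateCoverage and qubitNonCoverage, indicating
--         1. gateCoverage: how many gates are covered with this constellation and
--         2. qubitNonCoverage: the number of qubits that are in sets that are bigger than the maximum number of qubits in a processing zone. These qubits cannot be covered anymore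
--
--     The gateCoverage is to be maximized in the course of this algorithm
--
--     '''
--
--     # initialize variables of interest to zero
--     gateCoverage = 0
--
--     # Number of qubits that cannot be covered, because the corresponding sets are larger than the maximal number of Qubits in a processing zone Q
--     qubitNonCoverage = 0
--
--     # define running variable
--     processingZoneNo = 1
--
--     # iterate over elements in qubit sets
--     for n in range(len(S)):
--
--         # if one specific set of qubits has more elements than can be stored in the processing zone, the number of qubits that cannot be covered is increased
--         if len(S[n]) > qMax:
--             qubitNonCoverage += len(S[n])
--
--         # if the number of qubits in a set is still in the range of possible qubits in a processing zone, and we populate one of the possible processing zones whose number is limited by mMax: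
--         if len(S[n]) <= qMax and processingZoneNo <= mMax:
--
--             # we increase the gatecoverage
--             gateCoverage += len(G[n])
--
--             # and we jump to the next processing zone
--             processingZoneNo += 1
--
--     return gateCoverage, qubitNonCoverage
-- ===== SOURCE B (Python) =====
-- def EvaluateGateCoverage(S, G, nQ, qMax, mMax):
--     # qubits in sets too large for any processing zone
--     qubitNonCoverage = sum(len(s) for s in S if len(s) > qMax)
--     # pipeline: indices of zone-sized sets, first max(mMax, 0) of them get a zone
--     eligible = [n for n, s in enumerate(S) if len(s) <= qMax]
--     selected = eligible[:max(mMax, 0)]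
--     gateCoverage = sum(len(G[n]) for n in selected)
--     return gateCoverage, qubitNonCoverage
-- ===== Notes on version B (the rewrite author's own statement) =====
-- stated objective: alternative
-- what changed: Replaces A's single stateful loop carrying a zone counter by a data pipeline: enumerate+filter builds the list of eligible indices, a slice keeps the first max(mMax,0) of them, and two filter/map sums produce gateCoverage and qubitNonCoverage.
import Mathlib
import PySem

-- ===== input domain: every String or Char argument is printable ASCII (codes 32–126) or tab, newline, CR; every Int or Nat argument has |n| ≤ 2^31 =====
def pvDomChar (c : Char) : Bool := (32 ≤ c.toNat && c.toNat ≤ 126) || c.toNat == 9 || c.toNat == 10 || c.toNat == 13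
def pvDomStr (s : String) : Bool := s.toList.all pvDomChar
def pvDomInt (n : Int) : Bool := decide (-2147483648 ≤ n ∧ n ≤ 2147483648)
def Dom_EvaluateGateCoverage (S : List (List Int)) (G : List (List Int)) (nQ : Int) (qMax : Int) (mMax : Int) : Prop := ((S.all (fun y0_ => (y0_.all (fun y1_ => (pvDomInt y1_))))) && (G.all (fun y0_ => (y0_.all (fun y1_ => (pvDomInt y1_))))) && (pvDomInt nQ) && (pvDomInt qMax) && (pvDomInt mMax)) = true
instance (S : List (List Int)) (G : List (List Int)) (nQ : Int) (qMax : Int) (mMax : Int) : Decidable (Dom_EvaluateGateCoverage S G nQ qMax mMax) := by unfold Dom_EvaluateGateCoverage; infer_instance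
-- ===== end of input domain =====

-- ===== PORT A =====
-- B replaces A's stateful counting loop by a filter/slice/map-sum pipeline over enumerated indices;
-- equivalence of return values proved on Pre_ (inputs where A's G[n] accesses are in range).
-- A-side helper: one step of A's for-loop body over the state (gateCoverage, qubitNonCoverage, processingZoneNo)
def stepA (S G : List (List Int)) (qMax mMax : Int) (st : Int × Int × Int) (n : Nat) : Int × Int × Int :=
  let qnc' : Int := if qMax < ((S.getD n []).length : Int) then st.2.1 + ((S.getD n []).length : Int) else st.2.1
  if ((S.getD n []).length : Int) ≤ qMax ∧ st.2.2 ≤ mMax then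
    (st.1 + ((G.getD n []).length : Int), qnc', st.2.2 + 1)
  else
    (st.1, qnc', st.2.2)

def EvaluateGateCoverage (S : List (List Int)) (G : List (List Int)) (nQ : Int) (qMax : Int) (mMax : Int) : Int × Int :=
  let r := (List.range S.length).foldl (stepA S G qMax mMax) (0, 0, 1)
  (r.1, r.2.1)

-- ===== PORT B =====
-- B-side helper: the eligibility test applied to an enumerated pair (index, set)
def bPred (qMax : Int) (p : Int × List Int) : Bool := decide ((p.2.length : Int) ≤ qMax)

def EvaluateGateCoverage_alt (S : List (List Int)) (G : List (List Int)) (nQ : Int) (qMax : Int) (mMax : Int) : Int × Int :=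
  let qubitNonCoverage :=
    ((S.filter (fun s => decide (qMax < (s.length : Int)))).map (fun s => (s.length : Int))).sum
  let eligible := ((PySem.List.enumerate S 0).filter (bPred qMax)).map Prod.fst
  let selected := eligible.take (max mMax 0).toNat
  ((selected.map (fun n => ((PySem.List.pyGetD G n []).length : Int))).sum, qubitNonCoverage)

-- ===== PRECONDITION & SPEC =====
-- Pre_ excludes exactly the inputs on which Python A raises IndexError at G[n]: an index n of an
-- eligible set (len(S[n]) <= qMax) that is selected (fewer than mMax eligible sets precede it)
-- but lies beyond len(G).  B raises there too; nothing else is excluded.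
def Pre_EvaluateGateCoverage (S : List (List Int)) (G : List (List Int)) (nQ : Int) (qMax : Int) (mMax : Int) : Prop :=
  ∀ n : Nat, n < S.length → ((S.getD n []).length : Int) ≤ qMax →
    ((((S.take n).filter (fun s => decide ((s.length : Int) ≤ qMax))).length : Int) < mMax) →
    n < G.length
instance (S : List (List Int)) (G : List (List Int)) (nQ : Int) (qMax : Int) (mMax : Int) : Decidable (Pre_EvaluateGateCoverage S G nQ qMax mMax) := by unfold Pre_EvaluateGateCoverage; infer_instance

def pvWitness_EvaluateGateCoverage : List (List Int) × List (List Int) × Int × Int × Int :=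
  ([[1], [2, 3, 4]], [[1, 2], [5]], 4, 2, 1)

def Spec_EvaluateGateCoverage (S : List (List Int)) (G : List (List Int)) (nQ : Int) (qMax : Int) (mMax : Int) (out : Int × Int) : Prop := out = EvaluateGateCoverage_alt S G nQ qMax mMax
instance (S : List (List Int)) (G : List (List Int)) (nQ : Int) (qMax : Int) (mMax : Int) (out : Int × Int) : Decidable (Spec_EvaluateGateCoverage S G nQ qMax mMax out) := by unfold Spec_EvaluateGateCoverage; infer_instance

-- ===== CLAIM =====
def Claim_equal_EvaluateGateCoverage : Prop := ∀ (S : List (List Int)) (G : List (List Int)) (nQ : Int) (qMax : Int) (mMax : Int), Dom_EvaluateGateCoverage S G nQ qMax mMax → Pre_EvaluateGateCoverage S G nQ qMax mMax → Spec_EvaluateGateCoverage S G nQ qMax mMax (EvaluateGateCoverage S G nQ qMax mMax)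

-- ===== LEMMAS AND PROOFS =====

-- glen in B's pipeline
def glen (G : List (List Int)) (m : Int) : Int := ((PySem.List.pyGetD G m []).length : Int)

-- gateCoverage component of A's fold over the suffix = B's filter/take/map-sum pipeline over the suffix
theorem gc_eq (S G : List (List Int)) (qMax mMax : Int) :
    ∀ (k n : Nat), n + k = S.length → ∀ (gc qnc pz : Int),
      ((List.range' n k 1).foldl (stepA S G qMax mMax) (gc, qnc, pz)).1
        = gc + (((((PySem.List.enumerate (S.drop n) (n : Int)).filter (bPred qMax)).map
              Prod.fst).take (mMax + 1 - pz).toNat).map (glen G)).sum := by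
  intro k
  induction k with
  | zero =>
      intro n h gc qnc pz
      rw [List.drop_of_length_le (by omega)]
      simp [PySem.List.enumerate]
  | succ k ih =>
      intro n h gc qnc pz
      have hn : n < S.length := by omega
      have hg : S.getD n [] = S[n] := List.getD_eq_getElem S [] hn
      have hcast : (n : Int) + 1 = ((n + 1 : Nat) : Int) := by push_cast; ring
      rw [List.range'_succ, List.foldl_cons, List.drop_eq_getElem_cons hn,
          PySem.List.enumerate_cons, hcast, List.filter_cons]
      simp only [stepA, hg]
      generalize (if qMax < ((S[n] : List Int).length : Int)
          then qnc + ((S[n] : List Int).length : Int) else qnc) = qnc'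
      by_cases he : ((S[n] : List Int).length : Int) ≤ qMax
      · have hb : bPred qMax ((n : Int), S[n]) = true := by simp [bPred, he]
        rw [if_pos hb]
        by_cases hz : pz ≤ mMax
        · rw [if_pos (And.intro he hz), ih (n + 1) (by omega)]
          have ht : (mMax + 1 - pz).toNat = (mMax + 1 - (pz + 1)).toNat + 1 := by omega
          rw [List.map_cons, ht, List.take_succ_cons, List.map_cons, List.sum_cons]
          have hglen : glen G ((n : Int), S[n]).1 = ((G.getD n []).length : Int) := by
            simp [glen, PySem.List.pyGetD_natCast]
          rw [hglen]; ring
        · have hcond : ¬ (((S[n] : List Int).length : Int) ≤ qMax ∧ pz ≤ mMax) :=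
            fun hc => hz hc.2
          rw [if_neg hcond, ih (n + 1) (by omega)]
          have ht0 : (mMax + 1 - pz).toNat = 0 := by omega
          rw [List.map_cons, ht0, List.take_zero, List.map_nil, List.sum_nil]
          simp
      · have hb : ¬ (bPred qMax ((n : Int), S[n]) = true) := by simp [bPred, he]
        have hcond : ¬ (((S[n] : List Int).length : Int) ≤ qMax ∧ pz ≤ mMax) :=
          fun hc => he hc.1
        rw [if_neg hb, if_neg hcond, ih (n + 1) (by omega)]

-- qubitNonCoverage component of A's fold over the suffix = B's filter/map-sum over the suffix
theorem qnc_eq (S G : List (List Int)) (qMax mMax : Int) :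
    ∀ (k n : Nat), n + k = S.length → ∀ (gc qnc pz : Int),
      ((List.range' n k 1).foldl (stepA S G qMax mMax) (gc, qnc, pz)).2.1
        = qnc + (((S.drop n).filter (fun s => decide (qMax < (s.length : Int)))).map
            (fun s => (s.length : Int))).sum := by
  intro k
  induction k with
  | zero =>
      intro n h gc qnc pz
      rw [List.drop_of_length_le (by omega)]
      simp
  | succ k ih =>
      intro n h gc qnc pz
      have hn : n < S.length := by omega
      have hg : S.getD n [] = S[n] := List.getD_eq_getElem S [] hn
      rw [List.range'_succ, List.foldl_cons, List.drop_eq_getElem_cons hn, List.filter_cons]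
      simp only [stepA, hg]
      by_cases hbig : qMax < ((S[n] : List Int).length : Int)
      · have hcond : ¬ (((S[n] : List Int).length : Int) ≤ qMax ∧ pz ≤ mMax) :=
          fun hc => absurd hc.1 (by omega)
        rw [if_pos hbig, if_neg hcond, if_pos (show decide (qMax < ((S[n] : List Int).length : Int)) = true by simp [hbig]),
            ih (n + 1) (by omega), List.map_cons, List.sum_cons]
        ring
      · rw [if_neg hbig, if_neg (show ¬ (decide (qMax < ((S[n] : List Int).length : Int)) = true) by simp [hbig])]
        by_cases hc : ((S[n] : List Int).length : Int) ≤ qMax ∧ pz ≤ mMax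
        · rw [if_pos hc, ih (n + 1) (by omega)]
        · rw [if_neg hc, ih (n + 1) (by omega)]

-- ===== VERDICT =====
theorem EvaluateGateCoverage_spec : Claim_equal_EvaluateGateCoverage := by
  intro S G nQ qMax mMax _hDom _hPre
  unfold Spec_EvaluateGateCoverage EvaluateGateCoverage EvaluateGateCoverage_alt
  have hr : List.range S.length = List.range' 0 S.length 1 := List.range_eq_range'
  refine Prod.ext ?_ ?_
  · have hmax : (mMax + 1 - 1).toNat = (max mMax 0).toNat := by omega
    have := gc_eq S G qMax mMax S.length 0 (by omega) 0 0 1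
    simp only [hr, List.drop_zero, Nat.cast_zero, hmax] at this ⊢
    simpa using this
  · have := qnc_eq S G qMax mMax S.length 0 (by omega) 0 0 1
    simp only [hr, List.drop_zero] at this ⊢
    simpa using this
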